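-- pv_equiv track=rewrite | github.com/aarontodd82/DOS_Browser | pi_server/content_extractor.py | _quantize_font_size
-- ===== SOURCE A (Python) =====
-- _SIZE_BUCKETS = [8, 10, 12, 14, 16, 18, 20, 24]
--
-- def _quantize_font_size(px):
--     """Quantize a CSS font size in pixels to the nearest bucket."""
--     best = _SIZE_BUCKETS[0]
--     best_dist = abs(px - best)
--     for s in _SIZE_BUCKETS[1:]:
--         d = abs(px - s)
--         if d < best_dist:
--             best = s
--             best_dist = d
--     return best
-- ===== SOURCE B (Python) =====
-- _SIZE_BUCKETS = [8, 10, 12, 14, 16, 18, 20, 24]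
--
-- def _quantize_font_size(px):
--     """Quantize a CSS font size in pixels to the nearest bucket."""
--     buckets = _SIZE_BUCKETS
--     # binary search: first index with buckets[lo] >= px (bisect_left)
--     lo, hi = 0, len(buckets)
--     while lo < hi:
--         mid = (lo + hi) // 2
--         if buckets[mid] < px:
--             lo = mid + 1
--         else:
--             hi = mid
--     if lo == 0:
--         return buckets[0]
--     if lo == len(buckets):
--         return buckets[-1]
--     a, b = buckets[lo - 1], buckets[lo]
--     return a if px - a <= b - px else b
-- ===== Notes on version B (the rewrite author's own statement) =====
-- stated objective: alternative
-- what changed: Replaced the linear min-distance scan over all buckets with a binary search (bisect_left) for the insertion point followed by a single lower/upper neighbour comparison with ties to the lower bucket.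
import Mathlib
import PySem

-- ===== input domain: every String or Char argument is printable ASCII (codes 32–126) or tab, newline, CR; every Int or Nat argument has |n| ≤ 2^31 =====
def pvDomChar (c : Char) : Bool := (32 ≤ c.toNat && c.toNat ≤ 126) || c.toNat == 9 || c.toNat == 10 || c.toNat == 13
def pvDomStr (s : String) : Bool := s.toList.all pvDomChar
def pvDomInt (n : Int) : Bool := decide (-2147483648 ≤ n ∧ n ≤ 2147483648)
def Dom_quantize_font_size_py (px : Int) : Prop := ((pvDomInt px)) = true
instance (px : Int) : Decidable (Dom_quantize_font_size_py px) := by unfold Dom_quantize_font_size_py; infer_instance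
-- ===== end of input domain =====

-- B replaces A's linear nearest-bucket scan by a binary search for the insertion point plus one neighbour comparison (alternative algorithm, same result).
-- ===== PORT A =====
-- the for-loop of A over _SIZE_BUCKETS[1:] with state (best, best_dist)
def pvScan (px : Int) : List Int → Int × Int → Int × Int
  | [], st => st
  | s :: rest, st =>
      let d := |px - s|
      pvScan px rest (if d < st.2 then (s, d) else st)

def quantize_font_size_py (px : Int) : Int :=
  let best : Int := 8
  let best_dist : Int := |px - best|
  (pvScan px [10, 12, 14, 16, 18, 20, 24] (best, best_dist)).1

-- ===== PORT B =====
-- the while-loop of Source B, with fuel = list length (enough, since hi - lo shrinks every turn)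
def pvBsLoop (px : Int) (buckets : List Int) : Nat → Nat → Nat → Nat
  | 0, lo, _ => lo
  | fuel + 1, lo, hi =>
    if lo < hi then
      let mid := (lo + hi) / 2
      if buckets.getD mid 0 < px then pvBsLoop px buckets fuel (mid + 1) hi
      else pvBsLoop px buckets fuel lo mid
    else lo

def quantize_font_size_py_alt (px : Int) : Int :=
  let buckets : List Int := [8, 10, 12, 14, 16, 18, 20, 24]
  let lo := pvBsLoop px buckets buckets.length 0 buckets.length
  if lo = 0 then buckets.getD 0 0
  else if lo = buckets.length then buckets.getD (buckets.length - 1) 0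
  else
    let a := buckets.getD (lo - 1) 0
    let b := buckets.getD lo 0
    if px - a ≤ b - px then a else b

-- ===== PRECONDITION & SPEC =====
def Spec_quantize_font_size_py (px : Int) (out : Int) : Prop := out = quantize_font_size_py_alt px
instance (px : Int) (out : Int) : Decidable (Spec_quantize_font_size_py px out) := by unfold Spec_quantize_font_size_py; infer_instance

-- ===== CLAIM (what is proved, stated in full; the proofs are below) =====
def Claim_equal_quantize_font_size_py : Prop := ∀ (px : Int), Dom_quantize_font_size_py px → Spec_quantize_font_size_py px (quantize_font_size_py px)

-- ===== LEMMAS AND PROOFS =====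
-- Below the first bucket every candidate is farther than 8, so A's scan never updates.
theorem A_low (px : Int) (h : px ≤ 8) : quantize_font_size_py px = 8 := by
  unfold quantize_font_size_py
  simp [pvScan,
    show ¬(|px - 10| < |px - 8|) by simp only [Int.abs_eq_natAbs]; omega,
    show ¬(|px - 12| < |px - 8|) by simp only [Int.abs_eq_natAbs]; omega,
    show ¬(|px - 14| < |px - 8|) by simp only [Int.abs_eq_natAbs]; omega,
    show ¬(|px - 16| < |px - 8|) by simp only [Int.abs_eq_natAbs]; omega,
    show ¬(|px - 18| < |px - 8|) by simp only [Int.abs_eq_natAbs]; omega,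
    show ¬(|px - 20| < |px - 8|) by simp only [Int.abs_eq_natAbs]; omega,
    show ¬(|px - 24| < |px - 8|) by simp only [Int.abs_eq_natAbs]; omega]

-- Above the last bucket every step strictly improves, so A's scan ends at 24.
theorem A_high (px : Int) (h : 25 ≤ px) : quantize_font_size_py px = 24 := by
  unfold quantize_font_size_py
  simp [pvScan,
    show |px - 10| < |px - 8| by simp only [Int.abs_eq_natAbs]; omega,
    show |px - 12| < |px - 10| by simp only [Int.abs_eq_natAbs]; omega,
    show |px - 14| < |px - 12| by simp only [Int.abs_eq_natAbs]; omega,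
    show |px - 16| < |px - 14| by simp only [Int.abs_eq_natAbs]; omega,
    show |px - 18| < |px - 16| by simp only [Int.abs_eq_natAbs]; omega,
    show |px - 20| < |px - 18| by simp only [Int.abs_eq_natAbs]; omega,
    show |px - 24| < |px - 20| by simp only [Int.abs_eq_natAbs]; omega]

theorem B_low (px : Int) (h : px ≤ 8) : quantize_font_size_py_alt px = 8 := by
  unfold quantize_font_size_py_alt
  simp [pvBsLoop, List.getD,
    show ¬((16 : Int) < px) by omega,
    show ¬((12 : Int) < px) by omega,
    show ¬((10 : Int) < px) by omega,
    show ¬((8 : Int) < px) by omega]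

theorem B_high (px : Int) (h : 25 ≤ px) : quantize_font_size_py_alt px = 24 := by
  unfold quantize_font_size_py_alt
  simp [pvBsLoop, List.getD,
    show (16 : Int) < px by omega,
    show (20 : Int) < px by omega,
    show (24 : Int) < px by omega]

-- ===== VERDICT (by name: the statement is the Claim_ definition above) =====
theorem quantize_font_size_py_spec : Claim_equal_quantize_font_size_py := by
  intro px _
  unfold Spec_quantize_font_size_py
  by_cases h1 : px ≤ 8
  · rw [A_low px h1, B_low px h1]
  · by_cases h2 : 25 ≤ px
    · rw [A_high px h2, B_high px h2]
    · have h3 : 9 ≤ px := by omega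
      have h4 : px ≤ 24 := by omega
      interval_cases px <;> decide
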